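-- pv_equiv track=rewrite | github.com/posl/comment_recommendation | script/mod_gen/4_time/ja/141_B/7.py | is_easy
-- ===== SOURCE A (Python) =====
-- def is_easy(s):
--     for i in range(len(s)):
--         if i % 2 == 0 and s[i] in ['L', 'U', 'D']:
--             continue
--         elif i % 2 == 1 and s[i] in ['R', 'U', 'D']:
--             continue
--         else:
--             return False
--     return True
-- ===== SOURCE B (Python) =====
-- def is_easy(s):
--     while s:
--         if s[0] not in 'LUD':
--             return False
--         if len(s) > 1 and s[1] not in 'RUD':
--             return False
--         s = s[2:]
--     return True
-- ===== Notes on version B (the rewrite author's own statement) =====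
-- stated objective: simpler
-- what changed: Replaces the indexed loop with a modulo-2 parity branch at every position by a loop that consumes the string two characters at a time, checking each pair's even-position and odd-position character against its own allowed set, with no index or modulo arithmetic.
import Mathlib
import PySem

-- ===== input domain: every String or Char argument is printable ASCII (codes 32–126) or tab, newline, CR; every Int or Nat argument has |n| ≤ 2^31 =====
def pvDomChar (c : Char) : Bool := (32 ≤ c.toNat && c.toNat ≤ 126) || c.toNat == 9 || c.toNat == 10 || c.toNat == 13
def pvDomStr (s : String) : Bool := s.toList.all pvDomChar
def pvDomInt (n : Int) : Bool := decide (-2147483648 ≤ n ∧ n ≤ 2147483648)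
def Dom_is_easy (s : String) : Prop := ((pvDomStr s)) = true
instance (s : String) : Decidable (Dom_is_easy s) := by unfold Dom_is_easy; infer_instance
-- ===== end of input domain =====

-- B replaces A's indexed loop with i % 2 parity branches by a loop consuming two
-- characters at a time (even slot vs 'LUD', odd slot vs 'RUD'); simpler, same O(n) cost.

-- ===== PORT A =====
-- A's for-loop over range(len(s)) with early 'return False', as index recursion.
def isEasyLoop (cs : List Char) (i : Nat) : Bool :=
  if h : i < cs.length then
    if i % 2 == 0 && decide (cs[i] ∈ (['L', 'U', 'D'] : List Char)) then
      isEasyLoop cs (i + 1)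
    else if i % 2 == 1 && decide (cs[i] ∈ (['R', 'U', 'D'] : List Char)) then
      isEasyLoop cs (i + 1)
    else
      false
  else
    true
termination_by cs.length - i

def is_easy (s : String) : Bool := isEasyLoop s.toList 0

-- ===== PORT B =====
-- B's while-loop: check s[0] against 'LUD', s[1] (if present) against 'RUD', drop two.
def isEasyPairs : List Char → Bool
  | [] => true
  | [a] => decide (a ∈ (['L', 'U', 'D'] : List Char))
  | a :: b :: t =>
      if !decide (a ∈ (['L', 'U', 'D'] : List Char)) then false
      else if !decide (b ∈ (['R', 'U', 'D'] : List Char)) then false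
      else isEasyPairs t

def is_easy_alt (s : String) : Bool := isEasyPairs s.toList

-- ===== PRECONDITION & SPEC =====
def Spec_is_easy (s : String) (out : Bool) : Prop := out = is_easy_alt s
instance (s : String) (out : Bool) : Decidable (Spec_is_easy s out) := by unfold Spec_is_easy; infer_instance

-- ===== CLAIM (what is proved, stated in full; the proofs are below) =====
def Claim_equal_is_easy : Prop := ∀ (s : String), Dom_is_easy s → Spec_is_easy s (is_easy s)

-- ===== LEMMAS AND PROOFS =====

theorem isEasyLoop_eq_pairs (n : Nat) :
    ∀ (cs : List Char) (i : Nat), cs.length - i ≤ n → i % 2 = 0 →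
      isEasyLoop cs i = isEasyPairs (cs.drop i) := by
  induction n with
  | zero =>
    intro cs i hle _
    have hge : cs.length ≤ i := by omega
    rw [isEasyLoop, List.drop_eq_nil_of_le hge]
    simp [isEasyPairs, Nat.not_lt.mpr hge]
  | succ n ih =>
    intro cs i hle hpar
    by_cases h : i < cs.length
    · rw [isEasyLoop, dif_pos h, List.drop_eq_getElem_cons h, hpar]
      cases hda : decide (cs[i] ∈ (['L', 'U', 'D'] : List Char)) with
      | false =>
        cases hd : cs.drop (i + 1) with
        | nil =>
          simp only [hda, isEasyPairs, Bool.and_false, Bool.false_eq_true, if_false]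
          rw [if_neg (by simp)]
        | cons b t =>
          simp only [isEasyPairs, hda, Bool.and_false, Bool.false_eq_true, if_false,
            Bool.not_false, if_true]
          rw [if_neg (by simp)]
      | true =>
        rw [if_pos (by simp [hda])]
        by_cases h1 : i + 1 < cs.length
        · rw [List.drop_eq_getElem_cons h1, isEasyLoop, dif_pos h1]
          have hp1 : (i + 1) % 2 = 1 := by omega
          rw [hp1]
          simp only [isEasyPairs, hda, Bool.not_true, Bool.false_eq_true, if_false]
          cases hdb : decide (cs[i + 1] ∈ (['R', 'U', 'D'] : List Char)) with
          | false =>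
            simp only [Bool.and_false, Bool.not_false, if_true]
            rw [if_neg (by simp), if_neg (by simp)]
          | true =>
            simp only [Bool.not_true, Bool.false_eq_true, if_false]
            rw [if_neg (by simp), if_pos (by simp)]
            exact ih cs (i + 2) (by omega) (by omega)
        · rw [isEasyLoop, dif_neg h1, List.drop_eq_nil_of_le (by omega)]
          simp only [isEasyPairs, hda]
    · rw [isEasyLoop, dif_neg h, List.drop_eq_nil_of_le (by omega)]
      simp [isEasyPairs]

-- ===== VERDICT (by name: the statement is the Claim_ definition above) =====
theorem is_easy_spec : Claim_equal_is_easy := by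
  intro s _
  unfold Spec_is_easy is_easy is_easy_alt
  simpa using isEasyLoop_eq_pairs s.toList.length s.toList 0 (by omega) rfl
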